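-- pv_equiv track=rewrite | github.com/gwenzoeyang/mit-minesweeper-project | lab.py | create_neighbor_array
-- ===== SOURCE A (Python) =====
-- def create_neighbor_array(dimensions, original):
--     """
--     creates all possibilities of adjacent cells relative to the original
--
--     args:
--         dimensions: the dimensions of the board
--         original: the original cell to make neighbors around
--
--     returns: set of tuple locs
--     """
--     def helper(dimensions):
--         num_dimensions = len(dimensions)
--         if num_dimensions ==1:
--             return [[1,],[-1,],[0,]]
--         remainder = helper(dimensions[1:])
--         result = []
--         for neighbor in remainder:
--             result.append([1,] + neighbor)
--             result.append([-1,] + neighbor)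
--             result.append([0,] + neighbor)
--         return result
--     adding = helper(dimensions)
--     adding.remove([0 for _ in range(len(original))])
--     result = set()
--     for add in adding:
--         neighbor = [original[i] + add[i] for i in range(len(original))]
--         valid = {0<=neighbor[i]<dimensions[i] for i in range(len(original))}
--         if False in valid:
--             continue
--         else:
--             result.add(tuple(neighbor))
--     return result
-- ===== SOURCE B (Python) =====
-- def create_neighbor_array(dimensions, original):
--     """
--     creates all possibilities of adjacent cells relative to the original
--
--     returns: set of tuple locs
--     """
--     # per-dimension in-bounds candidate coordinates, and the number of in-bounds cells
--     cands = []
--     total = 1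
--     for d, o in zip(dimensions, original):
--         cs = [c for c in (o + 1, o - 1, o) if 0 <= c < d]
--         cands.append(cs)
--         total *= len(cs)
--     # enumerate every in-bounds cell by decoding a mixed-radix counter (first dimension fastest)
--     result = set()
--     for k in range(total):
--         cell = []
--         for cs in cands:
--             k, j = divmod(k, len(cs))
--             cell.append(cs[j])
--         t = tuple(cell)
--         if t != tuple(original):
--             result.add(t)
--     return result
-- ===== Notes on version B (the rewrite author's own statement) =====
-- stated objective: alternative
-- what changed: B never generates offset vectors: it builds per-dimension in-bounds candidate coordinate lists, multiplies their lengths, and enumerates the cells with a single flat counter loop decoding each index in mixed radix via divmod (skipping the original), instead of A's recursive construction of all 3^n offset vectors followed by removing the zero vector and bounds-filtering each sum.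
import Mathlib
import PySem

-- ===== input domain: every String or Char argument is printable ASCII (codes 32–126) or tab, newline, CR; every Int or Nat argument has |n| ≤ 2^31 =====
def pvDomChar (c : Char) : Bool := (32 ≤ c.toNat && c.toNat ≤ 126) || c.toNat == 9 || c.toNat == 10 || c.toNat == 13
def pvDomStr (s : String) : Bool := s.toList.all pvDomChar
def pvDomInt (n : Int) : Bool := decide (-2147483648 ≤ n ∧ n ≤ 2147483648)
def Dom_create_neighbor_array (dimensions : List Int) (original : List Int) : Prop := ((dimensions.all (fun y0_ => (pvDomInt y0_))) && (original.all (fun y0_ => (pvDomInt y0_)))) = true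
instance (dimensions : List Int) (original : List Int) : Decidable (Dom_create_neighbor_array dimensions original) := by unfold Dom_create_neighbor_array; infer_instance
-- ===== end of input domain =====

-- B enumerates the in-bounds cells directly by decoding a mixed-radix counter over per-dimension
-- candidate coordinates, instead of A's recursive generation of all 3^n offsets then filtering
-- (objective: alternative).

-- ===== PORT A =====
-- A's inner helper(dimensions); on [] Python recurses forever (RecursionError) — Pre_ excludes dimensions = []
def pvHelperA : List Int → List (List Int)
  | [] => []
  | [_] => [[1], [-1], [0]]
  | _ :: d :: ds =>
      (pvHelperA (d :: ds)).foldl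
        (fun result neighbor => result ++ [1 :: neighbor, -1 :: neighbor, 0 :: neighbor]) []

def create_neighbor_array (dimensions : List Int) (original : List Int) : List (List Int) :=
  -- adding.remove([0 for _ in range(len(original))]): ValueError when the zero vector is absent — excluded by Pre_
  match PySem.List.remove? (pvHelperA dimensions) (List.replicate original.length (0 : Int)) with
  | none => []
  | some adding =>
      adding.foldl (fun result add =>
        -- original[i] + add[i]: indices 0 ≤ i < len are in range inside Pre_, so pyGetD's default is never used
        let neighbor := (PySem.List.pyRange 0 (original.length : Int) 1).map
          (fun i => PySem.List.pyGetD original i 0 + PySem.List.pyGetD add i 0)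
        -- valid = {0<=neighbor[i]<dimensions[i] …}; 'False in valid' ↔ some index fails the bound
        if (PySem.List.pyRange 0 (original.length : Int) 1).all
            (fun i => decide (0 ≤ PySem.List.pyGetD neighbor i 0 ∧
                              PySem.List.pyGetD neighbor i 0 < PySem.List.pyGetD dimensions i 0))
        then PySem.Set.add result neighbor else result) []

-- ===== PORT B =====
-- candidate in-bounds coordinates of one dimension, in Source B's order (o+1, o-1, o)
def pvCandsB (d o : Int) : List Int :=
  [o + 1, o - 1, o].filter (fun c => decide (0 ≤ c ∧ c < d))

def create_neighbor_array_alt (dimensions : List Int) (original : List Int) : List (List Int) :=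
  -- one pass over zip(dimensions, original) building cands and total
  let p := (dimensions.zip original).foldl
    (fun (acc : List (List Int) × Int) po =>
      let cs := pvCandsB po.1 po.2
      (acc.1 ++ [cs], acc.2 * (cs.length : Int))) ([], 1)
  -- for k in range(total): decode k in mixed radix (first dimension fastest)
  -- divmod(k, len(cs)): len(cs) > 0 on every executed iteration (else total = 0 and the loop is empty)
  (PySem.List.pyRange 0 p.2 1).foldl (fun result k =>
    let st := p.1.foldl (fun (st : Int × List Int) cs =>
        (PySem.Int.floordiv st.1 (cs.length : Int),
         st.2 ++ [PySem.List.pyGetD cs (PySem.Int.mod st.1 (cs.length : Int)) 0]))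
      (k, ([] : List Int))
    if st.2 ≠ original then PySem.Set.add result st.2 else result) []

-- ===== PRECONDITION & SPEC =====
-- Pre_ excludes exactly the inputs where A raises: dimensions = [] (helper recurses forever,
-- RecursionError) and len(original) ≠ len(dimensions) (adding.remove raises ValueError).
def Pre_create_neighbor_array (dimensions : List Int) (original : List Int) : Prop :=
  dimensions ≠ [] ∧ original.length = dimensions.length
instance (dimensions : List Int) (original : List Int) : Decidable (Pre_create_neighbor_array dimensions original) := by unfold Pre_create_neighbor_array; infer_instance
def pvWitness_create_neighbor_array : List Int × List Int := ([3, 3], [1, 1])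

def Spec_create_neighbor_array (dimensions : List Int) (original : List Int) (out : List (List Int)) : Prop := out = create_neighbor_array_alt dimensions original
instance (dimensions : List Int) (original : List Int) (out : List (List Int)) : Decidable (Spec_create_neighbor_array dimensions original out) := by unfold Spec_create_neighbor_array; infer_instance

-- ===== CLAIM (what is proved, stated in full; the proofs are below) =====
def Claim_equal_create_neighbor_array : Prop := ∀ (dimensions : List Int) (original : List Int), Dom_create_neighbor_array dimensions original → Pre_create_neighbor_array dimensions original → Spec_create_neighbor_array dimensions original (create_neighbor_array dimensions original)

-- ===== LEMMAS AND PROOFS =====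

-- the list of cells B's counter loop enumerates, abstractly: cartesian product, first dimension fastest within
def pvProd : List (List Int) → List (List Int)
  | [] => [[]]
  | cs :: rest => (pvProd rest).flatMap (fun r => cs.map (fun c => c :: r))

-- B's decode step and its total, proof-side names
def pvStep (st : Int × List Int) (cs : List Int) : Int × List Int :=
  (PySem.Int.floordiv st.1 (cs.length : Int),
   st.2 ++ [PySem.List.pyGetD cs (PySem.Int.mod st.1 (cs.length : Int)) 0])

def pvTotalN (ls : List (List Int)) : Nat := (ls.map List.length).prod

-- the combined cands/total pass computes (map, product)
theorem pvPassEq (l : List (Int × Int)) : ∀ (a1 : List (List Int)) (a2 : Int),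
    l.foldl (fun (acc : List (List Int) × Int) po =>
      (acc.1 ++ [pvCandsB po.1 po.2], acc.2 * ((pvCandsB po.1 po.2).length : Int))) (a1, a2)
      = (a1 ++ l.map (fun po => pvCandsB po.1 po.2),
         a2 * ((pvTotalN (l.map (fun po => pvCandsB po.1 po.2)) : Nat) : Int)) := by
  induction l with
  | nil => intro a1 a2; simp [pvTotalN]
  | cons p t ih =>
      intro a1 a2
      simp only [List.foldl_cons, List.map_cons, ih]
      simp [pvTotalN, List.prod_cons]
      ring

-- decode accumulator shape
theorem pvStep_acc (ls : List (List Int)) : ∀ (k : Int) (acc : List Int),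
    (ls.foldl pvStep (k, acc)).2 = acc ++ (ls.foldl pvStep (k, [])).2 := by
  induction ls with
  | nil => intro k acc; simp
  | cons cs t ih =>
      intro k acc
      simp only [List.foldl_cons, pvStep, List.nil_append]
      rw [ih, ih (PySem.Int.floordiv k cs.length) [PySem.List.pyGetD cs (PySem.Int.mod k cs.length) 0]]
      simp

-- range decomposition for the mixed-radix counter
theorem pvRangeMul {α : Type} (L : Nat) (f : Nat → α) : ∀ (T : Nat),
    (List.range (L * T)).map f
      = (List.range T).flatMap (fun q => (List.range L).map (fun j => f (L * q + j))) := by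
  intro T
  induction T with
  | zero => simp
  | succ T ih =>
      rw [Nat.mul_succ, List.range_add, List.map_append, ih, List.range_succ, List.flatMap_append]
      simp [List.map_map, Function.comp]

theorem pvMapRangeGetD {α β : Type} [Inhabited α] (l : List α) (h : α → β) (d : α) :
    (List.range l.length).map (fun j => h (l.getD j d)) = l.map h := by
  apply List.ext_getElem
  · simp
  · intro i h1 h2
    simp only [List.getElem_map, List.getElem_range]
    rw [List.getD_eq_getElem _ _ (by simpa using h1)]

-- the decoded cells over range(total) ARE the cartesian product, in order
theorem pvDecodeEq : ∀ (ls : List (List Int)),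
    (List.range (pvTotalN ls)).map (fun kn => (ls.foldl pvStep (((kn : Nat) : Int), [])).2)
      = pvProd ls := by
  intro ls
  induction ls with
  | nil => simp [pvTotalN, pvProd]
  | cons cs rest ih =>
      rcases Nat.eq_zero_or_pos cs.length with hL | hL
      · have hcs : cs = [] := List.length_eq_zero_iff.mp hL
        subst hcs
        simp [pvTotalN, pvProd]
      · have hT : pvTotalN (cs :: rest) = cs.length * pvTotalN rest := by
          simp [pvTotalN, List.prod_cons]
        rw [hT, pvRangeMul]
        have hinner : ∀ q ∈ List.range (pvTotalN rest),
            (List.range cs.length).map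
              (fun j => ((cs :: rest).foldl pvStep (((cs.length * q + j : Nat) : Int), [])).2)
              = cs.map (fun c => c :: (rest.foldl pvStep (((q : Nat) : Int), [])).2) := by
          intro q _
          have hstep : ∀ j, j < cs.length →
              ((cs :: rest).foldl pvStep (((cs.length * q + j : Nat) : Int), [])).2
                = cs.getD j 0 :: (rest.foldl pvStep (((q : Nat) : Int), [])).2 := by
            intro j hj
            simp only [List.foldl_cons, pvStep]
            have hmod : PySem.Int.mod ((cs.length * q + j : Nat) : Int) (cs.length : Int)
                = ((j : Nat) : Int) := by
              rw [PySem.Int.mod_natCast]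
              congr 1
              rw [Nat.mul_add_mod]
              exact Nat.mod_eq_of_lt hj
            have hdiv : PySem.Int.floordiv ((cs.length * q + j : Nat) : Int) (cs.length : Int)
                = ((q : Nat) : Int) := by
              rw [PySem.Int.floordiv_natCast]
              congr 1
              rw [Nat.mul_add_div hL, Nat.div_eq_of_lt hj]
              omega
            rw [hmod, hdiv, PySem.List.pyGetD_natCast]
            show (List.foldl pvStep (((q : Nat) : Int), [] ++ [cs.getD j 0]) rest).2 = _
            rw [pvStep_acc rest (((q : Nat) : Int)) ([] ++ [cs.getD j 0])]
            simp
          calc (List.range cs.length).map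
                (fun j => ((cs :: rest).foldl pvStep (((cs.length * q + j : Nat) : Int), [])).2)
              = (List.range cs.length).map
                (fun j => cs.getD j 0 :: (rest.foldl pvStep (((q : Nat) : Int), [])).2) := by
                apply List.map_congr_left
                intro j hj
                exact hstep j (List.mem_range.mp hj)
            _ = cs.map (fun c => c :: (rest.foldl pvStep (((q : Nat) : Int), [])).2) :=
                pvMapRangeGetD cs (fun c => c :: (rest.foldl pvStep (((q : Nat) : Int), [])).2) 0
        rw [List.flatMap_congr hinner]
        have hmb : (List.range (pvTotalN rest)).flatMap
              (fun q => cs.map (fun c => c :: (rest.foldl pvStep (((q : Nat) : Int), [])).2))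
            = ((List.range (pvTotalN rest)).map
                (fun q => (rest.foldl pvStep (((q : Nat) : Int), [])).2)).flatMap
                (fun r => cs.map (fun c => c :: r)) := by
          rw [List.flatMap_map]
        rw [hmb, ih]
        rfl

-- pointwise bounds check 0 ≤ x < d, structurally
def pvInB : List Int → List Int → Bool
  | d :: ds, x :: xs => (decide (0 ≤ x ∧ x < d)) && pvInB ds xs
  | _, _ => true

theorem pvHelperA_cons (d : Int) (ds : List Int) (h : ds ≠ []) :
    pvHelperA (d :: ds) = (pvHelperA ds).flatMap (fun n => [1 :: n, -1 :: n, 0 :: n]) := by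
  cases ds with
  | nil => exact absurd rfl h
  | cons d2 t =>
      show (pvHelperA (d2 :: t)).foldl _ [] = _
      rw [PySem.List.foldl_append_eq_flatMap]; rfl

theorem pvHelperA_length : ∀ (ds : List Int), ds ≠ [] → ∀ a ∈ pvHelperA ds, a.length = ds.length := by
  intro ds
  induction ds with
  | nil => intro h; exact absurd rfl h
  | cons d t ih =>
      intro _ a ha
      cases t with
      | nil => simp [pvHelperA] at ha; rcases ha with h|h|h <;> simp [h]
      | cons d2 t2 =>
          rw [pvHelperA_cons d _ (by simp)] at ha
          simp only [List.mem_flatMap] at ha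
          obtain ⟨n, hn, hmem⟩ := ha
          have hl := ih (by simp) n hn
          simp at hmem
          rcases hmem with h|h|h <;> simp [h, hl]

theorem pvSumIte (l : List (List Int)) (z : List Int) :
    (l.map (fun n => if n = z then 1 else 0)).sum = l.count z := by
  rw [List.count_eq_countP]
  induction l with
  | nil => rfl
  | cons a t ih => by_cases h : a = z <;> simp [h, ih, Nat.add_comm]

theorem pvHelperA_count : ∀ (ds : List Int), ds ≠ [] →
    (pvHelperA ds).count (List.replicate ds.length (0 : Int)) = 1 := by
  intro ds
  induction ds with
  | nil => intro h; exact absurd rfl h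
  | cons d t ih =>
      intro _
      cases t with
      | nil => simp [pvHelperA]
      | cons d2 t2 =>
          rw [pvHelperA_cons d _ (by simp), List.count_flatMap]
          have h1 : ∀ n ∈ pvHelperA (d2 :: t2),
              (List.count (List.replicate (d :: d2 :: t2).length (0:Int)) ∘ fun n => [1 :: n, -1 :: n, 0 :: n]) n
                = if n = List.replicate (d2 :: t2).length (0:Int) then 1 else 0 := by
            intro n _
            by_cases h : n = List.replicate (d2 :: t2).length (0:Int) <;>
              simp [h, List.count_cons, List.replicate_succ]
          rw [List.map_congr_left h1, pvSumIte]
          exact ih (by simp)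

theorem pvZeroMem (ds : List Int) (h : ds ≠ []) :
    List.replicate ds.length (0 : Int) ∈ pvHelperA ds := by
  have := pvHelperA_count ds h
  exact List.count_pos_iff.mp (by omega)

theorem pvRemoveEqFilter {α : Type} [DecidableEq α] [BEq α] [LawfulBEq α] (l : List α) (x : α)
    (h1 : x ∈ l) (h2 : l.count x = 1) :
    PySem.List.remove? l x = some (l.filter (fun a => decide (a ≠ x))) := by
  induction l with
  | nil => cases h1
  | cons a t ih =>
      by_cases h : a = x
      · subst h
        rw [PySem.List.remove?_cons_self]
        have hnot : a ∉ t := by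
          rw [List.count_cons_self] at h2
          exact (List.count_eq_zero).mp (by omega)
        have hts : t.filter (fun b => !decide (b = a)) = t :=
          List.filter_eq_self.mpr (fun b hb => by simp; rintro rfl; exact hnot hb)
        simp [hts]
      · rw [PySem.List.remove?_cons_of_ne _ h]
        have hm : x ∈ t := by
          rcases List.mem_cons.mp h1 with h' | h'
          · exact absurd h'.symm h
          · exact h'
        rw [List.count_cons_of_ne h] at h2
        rw [ih hm h2]
        simp [h]

theorem pvZwEqSelf (os : List Int) : ∀ (a : List Int), a.length = os.length →
    (List.zipWith (· + ·) os a = os ↔ a = List.replicate os.length 0) := by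
  induction os with
  | nil => intro a ha; simp at ha; simp [ha]
  | cons o t ih =>
      intro a ha
      cases a with
      | nil => simp at ha
      | cons x xs =>
          simp only [List.zipWith_cons_cons, List.length_cons, List.replicate_succ, List.cons.injEq]
          rw [ih xs (by simpa using ha)]
          constructor
          · rintro ⟨h1, h2⟩; exact ⟨by omega, h2⟩
          · rintro ⟨h1, h2⟩; exact ⟨by omega, h2⟩

theorem pvNbEq (orig add : List Int) (h : add.length = orig.length) :
    (PySem.List.pyRange 0 (orig.length : Int) 1).map
      (fun i => PySem.List.pyGetD orig i 0 + PySem.List.pyGetD add i 0)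
      = List.zipWith (· + ·) orig add := by
  rw [PySem.List.pyRange_zero_nat, List.map_map]
  apply List.ext_getElem
  · simp [List.length_zipWith, h]
  · intro i hi1 hi2
    simp only [List.getElem_map, List.getElem_range, Function.comp,
      PySem.List.pyGetD_natCast, List.getElem_zipWith]
    have hi : i < orig.length := by simpa using hi1
    rw [List.getD_eq_getElem _ _ hi, List.getD_eq_getElem _ _ (by omega : i < add.length)]

theorem pvValidNat : ∀ (dims nb : List Int), dims.length = nb.length →
    ((List.range nb.length).all
      (fun k => decide (0 ≤ nb.getD k 0 ∧ nb.getD k 0 < dims.getD k 0)) = pvInB dims nb) := by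
  intro dims
  induction dims with
  | nil =>
      intro nb h
      cases nb
      · rfl
      · simp at h
  | cons d t ih =>
      intro nb h
      cases nb with
      | nil => simp at h
      | cons x xs =>
          simp only [List.length_cons, List.range_succ_eq_map, List.all_cons, List.all_map]
          have hc : (List.range xs.length).all
              ((fun k => decide (0 ≤ (x::xs).getD k 0 ∧ (x::xs).getD k 0 < (d::t).getD k 0)) ∘ Nat.succ)
              = (List.range xs.length).all
              (fun k => decide (0 ≤ xs.getD k 0 ∧ xs.getD k 0 < t.getD k 0)) :=
            List.all_congr rfl (fun k => rfl)
          rw [hc, ih xs (by simpa using h)]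
          simp [pvInB]

theorem pvValidEq (dims nb : List Int) (h : dims.length = nb.length) :
    ((PySem.List.pyRange 0 (nb.length : Int) 1).all
      (fun i => decide (0 ≤ PySem.List.pyGetD nb i 0 ∧
                        PySem.List.pyGetD nb i 0 < PySem.List.pyGetD dims i 0)) = pvInB dims nb) := by
  rw [PySem.List.pyRange_zero_nat, List.all_map]
  rw [← pvValidNat dims nb h]
  exact List.all_congr rfl (fun k => by simp [PySem.List.pyGetD_natCast])

theorem pvFoldlIf {α β γ : Type} (l : List α) (p : α → Prop) [DecidablePred p]
    (h : α → β) (g : γ → β → γ) (init : γ) :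
    l.foldl (fun res x => if p x then g res (h x) else res) init
      = (l.filterMap (fun x => if p x then some (h x) else none)).foldl g init := by
  induction l generalizing init with
  | nil => rfl
  | cons a t ih =>
      by_cases hp : p a <;> simp [hp, ih]

theorem pvFlatMapFilterMap {α β γ : Type} (f : α → Option β) (g : β → List γ) (l : List α) :
    (l.filterMap f).flatMap g
      = l.flatMap (fun a => match f a with | some b => g b | none => []) := by
  induction l with
  | nil => rfl
  | cons a t ih =>
      cases h : f a <;> simp [h, ih]

theorem pvTripleTrue (d o : Int) (w : List Int) :
    List.filterMap (fun c => if (decide (0 ≤ o + c ∧ o + c < d) && true) = true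
        then some ((o + c) :: w) else none) [1, -1, 0]
      = (pvCandsB d o).map (fun c => c :: w) := by
  simp only [pvCandsB, List.filterMap_cons, List.filterMap_nil, List.filter_cons,
    List.filter_nil, Bool.and_true]
  rw [show (o + -1 : Int) = o - 1 from by ring, show (o + 0 : Int) = o from by ring]
  cases hc1 : decide (0 ≤ o + 1 ∧ o + 1 < d) <;>
  cases hc2 : decide (0 ≤ o - 1 ∧ o - 1 < d) <;>
  cases hc3 : decide (0 ≤ o ∧ o < d) <;> simp

theorem pvTripleFalse (d o : Int) (w : List Int) :
    List.filterMap (fun c => if (decide (0 ≤ o + c ∧ o + c < d) && false) = true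
        then some ((o + c) :: w) else none) [1, -1, 0] = [] := by
  simp

theorem pvProdZipEq : ∀ (ds os : List Int), ds.length = os.length → ds ≠ [] →
    pvProd ((ds.zip os).map (fun po => pvCandsB po.1 po.2))
      = (pvHelperA ds).filterMap (fun a =>
          if pvInB ds (List.zipWith (· + ·) os a) then some (List.zipWith (· + ·) os a) else none) := by
  intro ds
  induction ds with
  | nil => intro os h hne; exact absurd rfl hne
  | cons d t ih =>
      intro os h _
      cases os with
      | nil => simp at h
      | cons o os' =>
          cases t with
          | nil =>
              cases os' with
              | cons a b => simp at h
              | nil =>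
                  show pvProd [pvCandsB d o] = _
                  have h1 : pvHelperA [d] = List.map (fun c => c :: ([] : List Int)) [1, -1, 0] := rfl
                  rw [h1, List.filterMap_map]
                  have h2 : ∀ c : Int,
                      ((fun a => if pvInB [d] (List.zipWith (· + ·) [o] a) = true
                          then some (List.zipWith (· + ·) [o] a) else none) ∘ fun c => c :: ([] : List Int)) c
                        = (fun c => if (decide (0 ≤ o + c ∧ o + c < d) && true) = true
                            then some ((o + c) :: ([] : List Int)) else none) c := fun c => rfl
                  rw [List.filterMap_congr (fun c _ => h2 c), pvTripleTrue]
                  simp [pvProd]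
          | cons d2 t2 =>
              cases os' with
              | nil => simp at h
              | cons o2 os2 =>
                  have hne2 : (d2 :: t2) ≠ [] := by simp
                  show pvProd (pvCandsB d o :: ((d2 :: t2).zip (o2 :: os2)).map (fun po => pvCandsB po.1 po.2)) = _
                  rw [pvHelperA_cons d _ hne2, List.filterMap_flatMap]
                  simp only [pvProd]
                  rw [ih (o2 :: os2) (by simpa using h) hne2, pvFlatMapFilterMap]
                  apply List.flatMap_congr
                  intro n _
                  set w := List.zipWith (· + ·) (o2 :: os2) n with hw
                  cases hin : pvInB (d2 :: t2) w
                  · rw [if_neg (by simp)]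
                    have h1 : ([1 :: n, -1 :: n, 0 :: n] : List (List Int))
                        = List.map (fun c => c :: n) [1, -1, 0] := rfl
                    rw [h1, List.filterMap_map]
                    have h2 : ∀ c : Int,
                        ((fun a => if pvInB (d :: d2 :: t2) (List.zipWith (· + ·) (o :: o2 :: os2) a) = true
                            then some (List.zipWith (· + ·) (o :: o2 :: os2) a) else none) ∘ fun c => c :: n) c
                          = (fun c => if (decide (0 ≤ o + c ∧ o + c < d) && false) = true
                              then some ((o + c) :: w) else none) c := by
                      intro c
                      simp only [Function.comp, List.zipWith_cons_cons, ← hw]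
                      show (if (pvInB (d :: d2 :: t2) ((o + c) :: w)) = true then _ else _) = _
                      have heq : pvInB (d :: d2 :: t2) ((o + c) :: w)
                          = (decide (0 ≤ o + c ∧ o + c < d) && false) := by
                        show (decide (0 ≤ o + c ∧ o + c < d) && pvInB (d2 :: t2) w) = _
                        rw [hin]
                      rw [heq]
                    rw [List.filterMap_congr (fun c _ => h2 c), pvTripleFalse]
                  · rw [if_pos (by simp)]
                    have h1 : ([1 :: n, -1 :: n, 0 :: n] : List (List Int))
                        = List.map (fun c => c :: n) [1, -1, 0] := rfl
                    rw [h1, List.filterMap_map]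
                    have h2 : ∀ c : Int,
                        ((fun a => if pvInB (d :: d2 :: t2) (List.zipWith (· + ·) (o :: o2 :: os2) a) = true
                            then some (List.zipWith (· + ·) (o :: o2 :: os2) a) else none) ∘ fun c => c :: n) c
                          = (fun c => if (decide (0 ≤ o + c ∧ o + c < d) && true) = true
                              then some ((o + c) :: w) else none) c := by
                      intro c
                      simp only [Function.comp, List.zipWith_cons_cons, ← hw]
                      show (if (pvInB (d :: d2 :: t2) ((o + c) :: w)) = true then _ else _) = _
                      have heq : pvInB (d :: d2 :: t2) ((o + c) :: w)
                          = (decide (0 ≤ o + c ∧ o + c < d) && true) := by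
                        show (decide (0 ≤ o + c ∧ o + c < d) && pvInB (d2 :: t2) w) = _
                        rw [hin]
                      rw [heq]
                    rw [List.filterMap_congr (fun c _ => h2 c), pvTripleTrue]

-- B's whole body equals the fold over the abstract product list
theorem pvAltEq (dims orig : List Int) :
    create_neighbor_array_alt dims orig
      = (pvProd ((dims.zip orig).map (fun po => pvCandsB po.1 po.2))).foldl
          (fun result cell => if cell ≠ orig then PySem.Set.add result cell else result) [] := by
  unfold create_neighbor_array_alt
  rw [pvPassEq]
  set cands := (dims.zip orig).map (fun po => pvCandsB po.1 po.2) with hc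
  simp only [List.nil_append, one_mul]
  rw [PySem.List.pyRange_zero_nat]
  rw [List.foldl_map]
  rw [show ∀ (init : List (List Int)), (List.range (pvTotalN cands)).foldl
        (fun result kn =>
          let st := cands.foldl (fun (st : Int × List Int) cs =>
              (PySem.Int.floordiv st.1 (cs.length : Int),
               st.2 ++ [PySem.List.pyGetD cs (PySem.Int.mod st.1 (cs.length : Int)) 0]))
            (((kn : Nat) : Int), ([] : List Int))
          if st.2 ≠ orig then PySem.Set.add result st.2 else result) init
        = ((List.range (pvTotalN cands)).map
            (fun kn => (cands.foldl pvStep (((kn : Nat) : Int), [])).2)).foldl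
            (fun result cell => if cell ≠ orig then PySem.Set.add result cell else result) init
      from fun init => by rw [List.foldl_map]; rfl]
  rw [pvDecodeEq]

-- ===== VERDICT (by name: the statement is the Claim_ definition above) =====
theorem create_neighbor_array_spec : Claim_equal_create_neighbor_array := by
  intro dims orig _ hpre
  obtain ⟨hne, hlen⟩ := hpre
  unfold Spec_create_neighbor_array create_neighbor_array
  rw [pvAltEq, pvProdZipEq dims orig hlen.symm hne]
  have hz : List.replicate orig.length (0:Int) = List.replicate dims.length 0 := by rw [hlen]
  rw [hz, pvRemoveEqFilter _ _ (pvZeroMem dims hne) (pvHelperA_count dims hne)]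
  have hcong : ∀ (acc : PySem.Set (List Int)),
      ∀ add ∈ (pvHelperA dims).filter (fun a => decide (a ≠ List.replicate dims.length 0)),
      (fun result add =>
        let neighbor := (PySem.List.pyRange 0 (orig.length : Int) 1).map
          (fun i => PySem.List.pyGetD orig i 0 + PySem.List.pyGetD add i 0)
        if (PySem.List.pyRange 0 (orig.length : Int) 1).all
            (fun i => decide (0 ≤ PySem.List.pyGetD neighbor i 0 ∧
                              PySem.List.pyGetD neighbor i 0 < PySem.List.pyGetD dims i 0))
        then PySem.Set.add result neighbor else result) acc add
      = (fun result add =>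
          if pvInB dims (List.zipWith (· + ·) orig add) = true
          then PySem.Set.add result (List.zipWith (· + ·) orig add) else result) acc add := by
    intro acc add ha
    have hlena : add.length = orig.length := by
      have := pvHelperA_length dims hne add (List.mem_of_mem_filter ha)
      omega
    show (if (PySem.List.pyRange 0 (orig.length : Int) 1).all _ = true
          then PySem.Set.add acc ((PySem.List.pyRange 0 (orig.length : Int) 1).map _) else acc) = _
    rw [pvNbEq orig add hlena]
    have hlnb : (List.zipWith (· + ·) orig add).length = orig.length := by
      rw [List.length_zipWith]; omega
    rw [← hlnb, pvValidEq dims _ (by omega)]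
  show List.foldl _ []
      ((pvHelperA dims).filter (fun a => decide (a ≠ List.replicate dims.length 0))) = _
  rw [PySem.List.foldl_congr_mem _ _ _ _ hcong]
  rw [pvFoldlIf _ (fun add => pvInB dims (List.zipWith (· + ·) orig add) = true)
        (fun add => List.zipWith (· + ·) orig add) PySem.Set.add []]
  rw [pvFoldlIf _ (fun cell => cell ≠ orig) (fun cell => cell) PySem.Set.add []]
  rw [List.filterMap_filter, List.filterMap_filterMap]
  congr 1
  apply List.filterMap_congr
  intro a ha
  have hla : a.length = orig.length := by
    have := pvHelperA_length dims hne a ha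
    omega
  have hiff : List.zipWith (· + ·) orig a = orig ↔ a = List.replicate dims.length 0 := by
    rw [pvZwEqSelf orig a hla, hlen]
  cases hb : pvInB dims (List.zipWith (· + ·) orig a)
  · simp
  · by_cases hz2 : a = List.replicate dims.length 0
    · have hzz := hiff.mpr hz2
      rw [hz2] at hzz
      simp [hz2, hzz]
    · have hne2 : List.zipWith (· + ·) orig a ≠ orig := fun he => hz2 (hiff.mp he)
      simp [hz2, hne2]
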